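-- pv_equiv track=rewrite | github.com/0412WX/nmf-vs-layer | layer_cut_merge_partition.py | compute_layer_diversity
-- ===== SOURCE A (Python) =====
-- def compute_layer_diversity(paths):
--     if not paths:
--         return [], 0
--
--     max_depth = max(len(p) - 1 for p in paths)
--     diversity = [0] * (max_depth + 1)
--
--     for d in range(max_depth + 1):
--         nodes_at_d = set()
--         for path in paths:
--             if d < len(path):
--                 nodes_at_d.add(path[d])
--         diversity[d] = len(nodes_at_d)
--
--     return diversity, max_depth
-- ===== SOURCE B (Python) =====
-- def compute_layer_diversity(paths):
--     if not paths:
--         return [], 0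
--     layer_sets = []
--     for path in paths:
--         for d, node in enumerate(path):
--             if d == len(layer_sets):
--                 layer_sets.append(set())
--             layer_sets[d].add(node)
--     return [len(s) for s in layer_sets], len(layer_sets) - 1
-- ===== Notes on version B (the rewrite author's own statement) =====
-- stated objective: alternative
-- what changed: Single pass over the paths building one set per depth (appending a new set when a deeper level first appears), instead of rescanning all paths once per depth level.
import Mathlib
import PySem

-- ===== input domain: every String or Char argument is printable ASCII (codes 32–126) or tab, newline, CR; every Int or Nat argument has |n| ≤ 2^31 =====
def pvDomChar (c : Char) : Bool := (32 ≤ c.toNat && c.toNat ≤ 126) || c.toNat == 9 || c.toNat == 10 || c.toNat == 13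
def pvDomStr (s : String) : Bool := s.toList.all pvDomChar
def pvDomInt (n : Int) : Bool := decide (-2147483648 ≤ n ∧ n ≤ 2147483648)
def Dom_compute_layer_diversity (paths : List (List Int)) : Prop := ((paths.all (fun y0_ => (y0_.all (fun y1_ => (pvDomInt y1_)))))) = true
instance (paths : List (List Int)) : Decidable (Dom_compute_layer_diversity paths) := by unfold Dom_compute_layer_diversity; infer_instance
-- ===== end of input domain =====

-- B replaces A's depth-by-depth rescan of all paths with a single pass over the paths that maintains one set per depth (objective: alternative algorithm, same measured cost).

-- ===== PORT A =====
def compute_layer_diversity (paths : List (List Int)) : List Int × Int :=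
  if paths = [] then ([], 0)
  else
    match PySem.List.max? (paths.map (fun p => (p.length : Int) - 1)) (fun x => x) with
    | none => ([], 0)  -- unreachable: paths ≠ []
    | some max_depth =>
      let diversity := (PySem.List.pyRange 0 (max_depth + 1) 1).map (fun d =>
        ((paths.foldl (fun s path =>
            if d < (path.length : Int) then PySem.Set.add s (PySem.List.pyGetD path d 0)
            else s) (PySem.Set.empty : PySem.Set Int)).length : Int))
      (diversity, max_depth)

-- ===== PORT B =====
-- inner loop of Source B: for d, node in enumerate(path): grow layer_sets if needed, add node at depth d
def cldAddPath (sets : List (PySem.Set Int)) (path : List Int) : List (PySem.Set Int) :=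
  (PySem.List.enumerate path).foldl (fun sets dn =>
    let sets := if dn.1 = (sets.length : Int) then sets ++ [(PySem.Set.empty : PySem.Set Int)] else sets
    sets.modify dn.1.toNat (fun s => PySem.Set.add s dn.2)) sets

def compute_layer_diversity_alt (paths : List (List Int)) : List Int × Int :=
  if paths = [] then ([], 0)
  else
    let layer_sets := paths.foldl cldAddPath []
    (layer_sets.map (fun s => (s.length : Int)), (layer_sets.length : Int) - 1)

-- ===== PRECONDITION & SPEC =====
def Spec_compute_layer_diversity (paths : List (List Int)) (out : List Int × Int) : Prop := out = compute_layer_diversity_alt paths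
instance (paths : List (List Int)) (out : List Int × Int) : Decidable (Spec_compute_layer_diversity paths out) := by unfold Spec_compute_layer_diversity; infer_instance

-- ===== CLAIM (what is proved, stated in full; the proofs are below) =====
def Claim_equal_compute_layer_diversity : Prop := ∀ (paths : List (List Int)), Dom_compute_layer_diversity paths → Spec_compute_layer_diversity paths (compute_layer_diversity paths)

-- ===== LEMMAS AND PROOFS =====

-- depth-k entry of a set list, ∅ past the end
def getS (sets : List (PySem.Set Int)) (k : Nat) : PySem.Set Int :=
  sets.getD k PySem.Set.empty

-- A's per-path step at depth k
def stepA (k : Nat) (s : PySem.Set Int) (path : List Int) : PySem.Set Int :=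
  if (k : Int) < (path.length : Int) then PySem.Set.add s (PySem.List.pyGetD path (k : Int) 0) else s

-- one step of Source B's inner loop: length
theorem innerstep_len (sets : List (PySem.Set Int)) (s : Nat) (x : Int) (hs : s ≤ sets.length) :
    ((if ((s : Int)) = (sets.length : Int) then sets ++ [(PySem.Set.empty : PySem.Set Int)] else sets).modify
      ((s : Int)).toNat (fun t => PySem.Set.add t x)).length = max sets.length (s + 1) := by
  split_ifs with h
  · simp at h
    simp [List.length_modify, h]
  · have : s < sets.length := by
      rcases Nat.lt_or_ge s sets.length with h' | h'
      · exact h'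
      · exact absurd (by omega : s = sets.length) (by exact_mod_cast fun hh => h (by exact_mod_cast hh))
    simp [List.length_modify]
    omega

-- one step of Source B's inner loop: entries
theorem innerstep_get (sets : List (PySem.Set Int)) (s : Nat) (x : Int) (hs : s ≤ sets.length) (k : Nat) :
    getS ((if ((s : Int)) = (sets.length : Int) then sets ++ [(PySem.Set.empty : PySem.Set Int)] else sets).modify
      ((s : Int)).toNat (fun t => PySem.Set.add t x)) k =
    if k = s then PySem.Set.add (getS sets k) x else getS sets k := by
  by_cases hlen : s = sets.length
  · rw [if_pos (by exact_mod_cast hlen : ((s : Int)) = ((sets.length : Nat) : Int))]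
    simp only [getS, List.getD_eq_getElem?_getD, List.getElem?_modify, Int.toNat_natCast]
    rcases Nat.lt_trichotomy k s with hk | hk | hk
    · rw [List.getElem?_append_left (by omega : k < sets.length)]
      simp [Nat.ne_of_lt hk, Nat.ne_of_lt' hk]
    · subst hk
      have h1 : (sets ++ [([] : PySem.Set Int)])[k]? = some ([] : PySem.Set Int) := by
        rw [List.getElem?_append_right (by omega : sets.length ≤ k)]
        simp [hlen]
      have h2 : sets[k]? = none := by rw [List.getElem?_eq_none_iff]; omega
      simp [h1, h2, PySem.Set.add, PySem.Set.contains, PySem.Set.empty]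
    · have h1 : (sets ++ [([] : PySem.Set Int)])[k]? = none := by
        rw [List.getElem?_eq_none_iff]; simp; omega
      have h2 : sets[k]? = none := by rw [List.getElem?_eq_none_iff]; omega
      simp [h1, h2, Nat.ne_of_lt' hk]
  · have hlt : s < sets.length := by omega
    rw [if_neg (fun hh => hlen (by exact_mod_cast hh))]
    simp only [getS, List.getD_eq_getElem?_getD, List.getElem?_modify, Int.toNat_natCast]
    rcases eq_or_ne k s with hk | hk
    · subst hk
      rw [List.getElem?_eq_getElem hlt]
      simp
    · simp [hk, Ne.symm hk]

-- Source B's inner loop over one path, starting at depth s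
theorem inner_loop (path : List Int) : ∀ (s : Nat) (sets : List (PySem.Set Int)), s ≤ sets.length →
    (((PySem.List.enumerate path (s : Int)).foldl (fun sets dn =>
        let sets := if dn.1 = (sets.length : Int) then sets ++ [(PySem.Set.empty : PySem.Set Int)] else sets
        sets.modify dn.1.toNat (fun t => PySem.Set.add t dn.2)) sets).length = max sets.length (s + path.length))
    ∧ ∀ k : Nat, getS ((PySem.List.enumerate path (s : Int)).foldl (fun sets dn =>
        let sets := if dn.1 = (sets.length : Int) then sets ++ [(PySem.Set.empty : PySem.Set Int)] else sets
        sets.modify dn.1.toNat (fun t => PySem.Set.add t dn.2)) sets) k =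
      if s ≤ k ∧ k < s + path.length then PySem.Set.add (getS sets k) (path.getD (k - s) 0) else getS sets k := by
  induction path with
  | nil =>
    intro s sets hs
    refine ⟨?_, fun k => ?_⟩
    · simp only [PySem.List.enumerate_nil, List.foldl_nil, List.length_nil]
      omega
    · simp only [PySem.List.enumerate_nil, List.foldl_nil, List.length_nil]
      rw [if_neg (by omega)]
  | cons x xs ih =>
    intro s sets hs
    rw [PySem.List.enumerate_cons]
    simp only [List.foldl_cons]
    set sets' := (if ((s : Int)) = (sets.length : Int) then sets ++ [(PySem.Set.empty : PySem.Set Int)] else sets).modify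
      ((s : Int)).toNat (fun t => PySem.Set.add t x) with hsets'
    have hlen' : sets'.length = max sets.length (s + 1) := innerstep_len sets s x hs
    have hget' : ∀ k, getS sets' k = if k = s then PySem.Set.add (getS sets k) x else getS sets k :=
      innerstep_get sets s x hs
    have hcast : ((s : Int)) + 1 = ((s + 1 : Nat) : Int) := by push_cast; ring
    rw [hcast]
    obtain ⟨ihl, ihg⟩ := ih (s + 1) sets' (by omega)
    refine ⟨?_, fun k => ?_⟩
    · rw [ihl, hlen']
      simp only [List.length_cons]
      omega
    · rw [ihg k, hget' k]
      simp only [List.length_cons]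
      split_ifs
      all_goals try omega
      all_goals try rfl
      all_goals try (rw [show k - s = (k - (s + 1)) + 1 from by omega, List.getD_cons_succ])
      all_goals (rw [show k - s = 0 from by omega]; simp)

-- per-path form of the two invariants
theorem cldAddPath_len (sets : List (PySem.Set Int)) (path : List Int) :
    (cldAddPath sets path).length = max sets.length path.length := by
  have := (inner_loop path 0 sets (Nat.zero_le _)).1
  simpa [cldAddPath] using this

theorem cldAddPath_get (sets : List (PySem.Set Int)) (path : List Int) (k : Nat) :
    getS (cldAddPath sets path) k = stepA k (getS sets k) path := by
  have := (inner_loop path 0 sets (Nat.zero_le _)).2 k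
  simp only [Nat.cast_zero] at this
  unfold cldAddPath
  rw [this]
  unfold stepA
  rcases Nat.lt_or_ge k path.length with hk | hk
  · rw [if_pos (by omega), if_pos (by omega)]
    rw [PySem.List.pyGetD_natCast]
    simp
  · rw [if_neg (by omega), if_neg (by omega)]

-- the whole B fold, per index and length
theorem foldB_len (paths : List (List Int)) : ∀ (sets : List (PySem.Set Int)),
    (paths.foldl cldAddPath sets).length = paths.foldl (fun a p => max a p.length) sets.length := by
  induction paths with
  | nil => intro sets; rfl
  | cons p ps ih =>
    intro sets
    simp only [List.foldl_cons]
    rw [ih, cldAddPath_len]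

theorem foldB_get (paths : List (List Int)) : ∀ (sets : List (PySem.Set Int)) (k : Nat),
    getS (paths.foldl cldAddPath sets) k = paths.foldl (stepA k) (getS sets k) := by
  induction paths with
  | nil => intro sets k; rfl
  | cons p ps ih =>
    intro sets k
    simp only [List.foldl_cons]
    rw [ih, cldAddPath_get]

-- fold-max over Nat: bounds and attainment
theorem fold_max_spec (l : List Nat) : ∀ (a : Nat),
    a ≤ l.foldl max a ∧ (∀ x ∈ l, x ≤ l.foldl max a) ∧ (l.foldl max a = a ∨ l.foldl max a ∈ l) := by
  induction l with
  | nil => intro a; exact ⟨le_refl a, by simp, Or.inl rfl⟩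
  | cons x xs ih =>
    intro a
    obtain ⟨h1, h2, h3⟩ := ih (max a x)
    refine ⟨le_trans (le_max_left a x) h1, ?_, ?_⟩
    · intro y hy
      rcases List.mem_cons.mp hy with hy | hy
      · rw [hy]; exact le_trans (le_max_right a x) h1
      · exact h2 y hy
    · rcases h3 with h3 | h3
      · rcases max_choice a x with hc | hc
        · rw [List.foldl_cons, h3, hc]; exact Or.inl rfl
        · rw [List.foldl_cons, h3, hc]; exact Or.inr (List.mem_cons_self)
      · exact Or.inr (List.mem_cons_of_mem x h3)

theorem compute_layer_diversity_eq (paths : List (List Int)) :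
    compute_layer_diversity paths = compute_layer_diversity_alt paths := by
  unfold compute_layer_diversity compute_layer_diversity_alt
  by_cases hnil : paths = []
  · simp [hnil]
  · rw [if_neg hnil, if_neg hnil]
    rcases hmax : PySem.List.max? (paths.map (fun p => (p.length : Int) - 1)) (fun x => x) with _ | m
    · exact absurd (by simpa using (PySem.List.max?_eq_none_iff _ _).mp hmax) hnil
    · rw [hmax]
      dsimp only
      -- characterize m as (M : Int) - 1, M the fold-max of lengths
      set M : Nat := paths.foldl (fun a p => max a p.length) 0 with hM
      have hmem := PySem.List.max?_mem hmax
      have hub : ∀ p ∈ paths, (p.length : Int) - 1 ≤ m := fun p hp =>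
        PySem.List.max?_isMax hmax _ (List.mem_map_of_mem hp)
      obtain ⟨q, hq, hqm'⟩ := List.mem_map.mp hmem
      have hqm : (q.length : Int) - 1 = m := hqm'
      obtain ⟨-, hMub, hMmem⟩ := fold_max_spec (paths.map List.length) 0
      have hfold_eq : (paths.map List.length).foldl max 0 = M := by
        rw [hM, List.foldl_map]
      have hqM : q.length ≤ M := by
        rw [← hfold_eq]; exact hMub _ (List.mem_map_of_mem hq)
      have hm_eq : m = (M : Int) - 1 := by
        rcases hMmem with h0 | hMm
        · rw [hfold_eq] at h0
          omega
        · rw [hfold_eq] at hMm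
          obtain ⟨p, hp, hpM⟩ := List.mem_map.mp hMm
          have h3 : (p.length : Int) - 1 ≤ m := hub p hp
          omega
      have hLlen : (paths.foldl cldAddPath []).length = M := by
        rw [foldB_len]; rfl
      rw [Prod.mk.injEq]
      constructor
      · -- the diversity lists agree
        have hm1 : m + 1 = (M : Nat) := by omega
        rw [hm1, PySem.List.pyRange_zero_natCast]
        rw [List.map_map]
        apply List.ext_getElem
        · simp [hLlen]
        · intro k hk1 hk2
          simp only [List.length_map, List.length_range] at hk1
          simp only [List.getElem_map, List.getElem_range, Function.comp]
          have hkM : k < (paths.foldl cldAddPath []).length := by omega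
          have hgetS : getS (paths.foldl cldAddPath []) k = (paths.foldl cldAddPath [])[k] := by
            simp [getS, List.getD_eq_getElem?_getD, List.getElem?_eq_getElem hkM]
          have hget : (paths.foldl cldAddPath [])[k] = paths.foldl (stepA k) PySem.Set.empty := by
            rw [← hgetS, foldB_get]; rfl
          rw [hget]
          rfl
      · omega

-- ===== VERDICT (by name: the statement is the Claim_ definition above) =====
theorem compute_layer_diversity_spec : Claim_equal_compute_layer_diversity := by
  intro paths _
  unfold Spec_compute_layer_diversity
  exact compute_layer_diversity_eq paths
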